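-- pv_equiv track=rewrite | github.com/reo91004/Algorithm | 3. Baekjoon/24511. queuestack.py | Solution
-- ===== SOURCE A (Python) =====
-- from collections import deque
--
-- def Solution(N, A, B, M, C):
--     queuestack = deque()
--
--     # 초기 큐 상태 설정
--     for i in range(N):
--         if A[i] == 0:  # 큐인 경우에만 추가
--             queuestack.appendleft(B[i])
--
--     results = []
--     for x in C:
--         queuestack.append(x)
--         results.append(queuestack.popleft())
--
--     return results
-- ===== SOURCE B (Python) =====
-- def Solution(N, A, B, M, C):
--     n = max(N, 0)
--     q = [b for a, b in zip(A[:n], B[:n]) if a == 0]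
--     k = len(q)
--     return [q[k - 1 - j] if j < k else C[j - k] for j in range(len(C))]
-- ===== Notes on version B (the rewrite author's own statement) =====
-- stated objective: alternative
-- what changed: Replaces the deque and the per-query append/popleft simulation with a zip-based pair filter for the initial queue and a direct index formula (result[j] = q[k-1-j] if j<k else C[j-k]) computed in one comprehension, eliminating the deque and both mutating loops.
import Mathlib
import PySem

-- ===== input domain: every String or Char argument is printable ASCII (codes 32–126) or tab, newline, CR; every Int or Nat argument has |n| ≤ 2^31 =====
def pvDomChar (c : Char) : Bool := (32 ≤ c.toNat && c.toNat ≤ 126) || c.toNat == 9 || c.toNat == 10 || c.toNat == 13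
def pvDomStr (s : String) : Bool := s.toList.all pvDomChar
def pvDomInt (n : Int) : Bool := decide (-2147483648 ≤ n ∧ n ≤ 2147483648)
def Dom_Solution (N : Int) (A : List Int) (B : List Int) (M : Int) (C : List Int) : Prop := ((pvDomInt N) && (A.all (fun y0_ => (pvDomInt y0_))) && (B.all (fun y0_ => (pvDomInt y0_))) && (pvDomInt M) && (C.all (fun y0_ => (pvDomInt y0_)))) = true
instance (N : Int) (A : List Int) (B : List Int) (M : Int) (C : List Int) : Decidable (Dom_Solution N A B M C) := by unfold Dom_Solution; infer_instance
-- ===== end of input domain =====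

-- B replaces the deque simulation with a zip-based filter for the initial queue and a
-- direct index formula for each output position; objective: alternative (same cost).

-- ===== PORT A =====
-- deque as a List Int: appendleft = cons, append = ++ [x], popleft = head/tail.
-- B[i] on a queued out-of-range index would raise in Python; ported as getD 0, excluded by Pre_.
def Solution (N : Int) (A : List Int) (B : List Int) (M : Int) (C : List Int) : List Int :=
  let queuestack :=
    (List.range N.toNat).foldl
      (fun qs i =>
        if (PySem.List.pyGet? A (Int.ofNat i)).getD 0 = 0 then
          (PySem.List.pyGet? B (Int.ofNat i)).getD 0 :: qs
        else qs) []
  let st :=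
    C.foldl
      (fun (st : List Int × List Int) x =>
        let q2 := st.1 ++ [x]
        (q2.tail, st.2 ++ [q2.headD 0]))
      (queuestack, [])
  st.2

-- ===== PORT B =====
-- q = [b for a, b in zip(A[:n], B[:n]) if a == 0]; result j picked by index formula.
def Solution_alt (N : Int) (A : List Int) (B : List Int) (M : Int) (C : List Int) : List Int :=
  let n := (max N 0).toNat
  let q := ((A.take n).zip (B.take n)).filterMap (fun p => if p.1 = 0 then some p.2 else none)
  let k := q.length
  (List.range C.length).map (fun j => if j < k then q.getD (k - 1 - j) 0 else C.getD (j - k) 0)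

-- ===== PRECONDITION & SPEC =====
-- Pre_ excludes exactly the inputs where Python A raises IndexError: some i < N with
-- i out of range of A, or queued (A[i]==0) but out of range of B.
def Pre_Solution (N : Int) (A : List Int) (B : List Int) (M : Int) (C : List Int) : Prop :=
  N.toNat ≤ A.length ∧ ∀ i : Nat, i < N.toNat → (A.getD i 0 = 0 → i < B.length)
instance (N : Int) (A : List Int) (B : List Int) (M : Int) (C : List Int) : Decidable (Pre_Solution N A B M C) := by unfold Pre_Solution; infer_instance
def pvWitness_Solution : Int × List Int × List Int × Int × List Int := (2, [0, 1], [3, 4], 2, [5, 6])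
def Spec_Solution (N : Int) (A : List Int) (B : List Int) (M : Int) (C : List Int) (out : List Int) : Prop := out = Solution_alt N A B M C
instance (N : Int) (A : List Int) (B : List Int) (M : Int) (C : List Int) (out : List Int) : Decidable (Spec_Solution N A B M C out) := by unfold Spec_Solution; infer_instance

-- ===== CLAIM (what is proved, stated in full; the proofs are below) =====
def Claim_equal_Solution : Prop := ∀ (N : Int) (A : List Int) (B : List Int) (M : Int) (C : List Int), Dom_Solution N A B M C → Pre_Solution N A B M C → Spec_Solution N A B M C (Solution N A B M C)

-- ===== LEMMAS AND PROOFS =====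

-- A's init loop (cons on the accumulator) builds the reverse of the index-filtered list.
theorem pv_init_eq {α β : Type} (p : α → Prop) [DecidablePred p] (f : α → β)
    (l : List α) (init : List β) :
    l.foldl (fun qs i => if p i then f i :: qs else qs) init
      = (l.filterMap (fun i => if p i then some (f i) else none)).reverse ++ init := by
  induction l generalizing init with
  | nil => simp
  | cons a l ih =>
    by_cases h : p a <;> simp [List.foldl_cons, h, ih]

-- A's query loop: each step appends x and pops the front; the collected pops are
-- the first |C| elements of qs ++ C.
theorem pv_loop_eq (C qs res : List Int) :
    (C.foldl
      (fun (st : List Int × List Int) x =>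
        let q2 := st.1 ++ [x]
        (q2.tail, st.2 ++ [q2.headD 0]))
      (qs, res)).2 = res ++ (qs ++ C).take C.length := by
  induction C generalizing qs res with
  | nil => simp
  | cons x C ih =>
    cases qs with
    | nil =>
      simp only [List.foldl_cons, List.nil_append, List.tail_cons, List.headD_cons]
      rw [ih]
      simp [List.take_of_length_le]
    | cons a qs =>
      simp only [List.foldl_cons, List.cons_append, List.tail_cons, List.headD_cons]
      rw [ih]
      simp

-- zip against a list at most as long as the left part ignores the left's tail.
theorem pv_zip_of_le {α β : Type} (l₁ t : List α) (l₂ : List β) (h : l₂.length ≤ l₁.length) :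
    (l₁ ++ t).zip l₂ = l₁.zip l₂ := by
  induction l₁ generalizing l₂ with
  | nil => cases l₂ with
    | nil => simp
    | cons b bs => simp at h
  | cons a as ih =>
    cases l₂ with
    | nil => simp
    | cons b bs => simp_all [List.zip_cons_cons]

-- Under Pre_, the index-based filter over range n equals the zip-based filter.
theorem pv_zip_eq (A B : List Int) (n : Nat)
    (h : ∀ i : Nat, i < n → i < A.length ∧ (A.getD i 0 = 0 → i < B.length)) :
    (List.range n).filterMap
        (fun i => if (PySem.List.pyGet? A (Int.ofNat i)).getD 0 = 0 then
                    some ((PySem.List.pyGet? B (Int.ofNat i)).getD 0) else none)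
      = ((A.take n).zip (B.take n)).filterMap (fun p => if p.1 = 0 then some p.2 else none) := by
  induction n with
  | zero => simp
  | succ n ih =>
    have hn := h n (Nat.lt_succ_self n)
    have hA : n < A.length := hn.1
    have ihe := ih (fun i hi => h i (Nat.lt_succ_of_lt hi))
    rw [List.range_succ, List.filterMap_append, ihe]
    have hAopt : A[n]? = some A[n] := List.getElem?_eq_getElem hA
    have htA : A.take (n+1) = A.take n ++ [A[n]] := by
      rw [List.take_add_one]; simp [hAopt]
    by_cases hB : n < B.length
    · have hBopt : B[n]? = some B[n] := List.getElem?_eq_getElem hB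
      have htB : B.take (n+1) = B.take n ++ [B[n]] := by
        rw [List.take_add_one]; simp [hBopt]
      rw [htA, htB, List.zip_append (by simp; omega), List.filterMap_append]
      simp [List.filterMap_cons, PySem.List.pyGet?_natCast, hAopt, hBopt]
    · -- n ≥ |B|: A[n] ≠ 0 by Pre_, and the zip ignores the appended A element.
      have hA0 : A[n] ≠ 0 := by
        intro h0
        exact hB (hn.2 (by rwa [List.getD_eq_getElem _ _ hA]))
      have htB : B.take (n+1) = B.take n := by
        rw [List.take_of_length_le (by omega), List.take_of_length_le (by omega)]
      rw [htA, htB, pv_zip_of_le _ _ _ (by simp; omega)]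
      simp [PySem.List.pyGet?_natCast, hAopt, hA0]
  
-- The first |C| elements of q.reverse ++ C, expressed as a direct index formula.
theorem pv_take_map (q C : List Int) :
    (q.reverse ++ C).take C.length
      = (List.range C.length).map
          (fun j => if j < q.length then q.getD (q.length - 1 - j) 0 else C.getD (j - q.length) 0) := by
  apply List.ext_getElem
  · simp
  · intro j h₁ h₂
    have hj : j < C.length := by simpa using h₂
    simp only [List.getElem_take, List.getElem_map, List.getElem_range]
    by_cases h : j < q.length
    · rw [if_pos h, List.getElem_append_left (by simpa using h), List.getElem_reverse,
        List.getD_eq_getElem _ _ (show q.length - 1 - j < q.length by omega)]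
    · rw [if_neg h, List.getElem_append_right (by simpa using h),
        List.getD_eq_getElem _ _ (show j - q.length < C.length by omega)]
      congr 1; simp

-- ===== VERDICT (by name: the statement is the Claim_ definition above) =====
theorem Solution_spec : Claim_equal_Solution := by
  intro N A B M C _ hpre
  show Solution N A B M C = Solution_alt N A B M C
  unfold Solution Solution_alt
  have hn : (max N 0).toNat = N.toNat := by omega
  rw [pv_init_eq (fun i : Nat => (PySem.List.pyGet? A (Int.ofNat i)).getD 0 = 0)
        (fun i : Nat => (PySem.List.pyGet? B (Int.ofNat i)).getD 0),
      pv_loop_eq, hn, pv_zip_eq A B N.toNat (fun i hi => ⟨by have := hpre.1; omega, hpre.2 i hi⟩)]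
  simp only [List.append_nil, List.nil_append]
  exact pv_take_map _ C
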